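-- pv_equiv track=rewrite | github.com/deniskrumko/advent-of-code | 2017/day2/main.py | checksum_2
-- ===== SOURCE A (Python) =====
-- def checksum_2(puzzle):
--     """Second checksum function."""
--     result_sum = 0
--
--     for row in puzzle:
--         numbers = [int(x) for x in row.split()]
--
--         for index_i, i in enumerate(numbers):
--             for index_j, j in enumerate(numbers):
--                 if index_i == index_j:
--                     continue
--
--                 if i % j == 0:
--                     result_sum += i // j
--
--     return result_sum
-- ===== SOURCE B (Python) =====
-- def checksum_2(puzzle):
--     """Second checksum function: count-weighted iteration over distinct values."""
--     total = 0
--     for row in puzzle: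
--         counts = {}
--         for x in row.split():
--             v = int(x)
--             counts[v] = counts.get(v, 0) + 1
--         vals = list(counts)
--         for idx, v in enumerate(vals):
--             c = counts[v]
--             total += c * (c - 1)
--             for w in vals[idx + 1:]:
--                 d = counts[w]
--                 if v % w == 0:
--                     total += c * d * (v // w)
--                 if w % v == 0:
--                     total += d * c * (w // v)
--     return total
-- ===== Notes on version B (the rewrite author's own statement) =====
-- stated objective: alternative
-- what changed: Replaces A's position-based double scan over all ordered index pairs by building a value->count dict per row and iterating each unordered pair of distinct values once (testing divisibility in both directions, weighted by count products), plus a count*(count-1) diagonal term for equal-value index pairs.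
import Mathlib
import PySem

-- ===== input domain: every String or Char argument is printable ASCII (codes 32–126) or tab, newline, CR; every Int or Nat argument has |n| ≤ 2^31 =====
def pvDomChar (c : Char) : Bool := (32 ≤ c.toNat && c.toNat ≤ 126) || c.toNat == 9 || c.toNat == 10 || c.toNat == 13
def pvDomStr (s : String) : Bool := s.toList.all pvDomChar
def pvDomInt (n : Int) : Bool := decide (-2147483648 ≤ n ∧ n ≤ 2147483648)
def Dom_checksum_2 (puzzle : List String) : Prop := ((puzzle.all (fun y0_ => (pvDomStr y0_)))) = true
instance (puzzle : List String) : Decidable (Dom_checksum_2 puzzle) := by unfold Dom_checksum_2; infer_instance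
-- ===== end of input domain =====

-- B replaces A's position-based double scan by a count-weighted iteration over the row's
-- distinct values (a counter dict + one pass over unordered distinct-value pairs); objective: alternative.


-- ===== PORT A =====
-- literal port of A: for each row, numbers = [int(x) for x in row.split()], then the
-- double enumerate loop skipping equal indices ((ofStr? x).getD 0 is int(x); under
-- Pre_ every token parses, so the default is never used)
def checksum_2 (puzzle : List String) : Int :=
  puzzle.foldl (fun result_sum row =>
    let numbers := (PySem.Str.split₀ row).map (fun x => (PySem.Int.ofStr? x).getD 0)
    (PySem.List.enumerate numbers).foldl (fun acc p =>
      (PySem.List.enumerate numbers).foldl (fun acc2 q =>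
        if p.1 = q.1 then acc2
        else if PySem.Int.mod p.2 q.2 = 0 then acc2 + PySem.Int.floordiv p.2 q.2
        else acc2) acc) result_sum) 0

-- ===== PORT B =====
-- 'for idx, v in enumerate(vals): … for w in vals[idx+1:]' as structural recursion on vals
def pvAltPairs (counts : PySem.Dict Int Int) : List Int → Int → Int
  | [], acc => acc
  | v :: rest, acc =>
    let c := counts.getD v 0
    pvAltPairs counts rest
      (rest.foldl (fun a w =>
        let d := counts.getD w 0
        let a1 := if PySem.Int.mod v w = 0 then a + c * d * PySem.Int.floordiv v w else a
        if PySem.Int.mod w v = 0 then a1 + d * c * PySem.Int.floordiv w v else a1)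
        (acc + c * (c - 1)))

def checksum_2_alt (puzzle : List String) : Int :=
  puzzle.foldl (fun total row =>
    let counts := ((PySem.Str.split₀ row).map (fun x => (PySem.Int.ofStr? x).getD 0)).foldl
      (fun d v => d.insert v (d.getD v 0 + 1)) PySem.Dict.empty
    pvAltPairs counts counts.keys total) 0

-- ===== PRECONDITION & SPEC =====
-- Pre_ excludes exactly the inputs where the Python A raises: a token int() rejects
-- (ValueError), or a row containing 0 together with a second number (ZeroDivisionError).
def Pre_checksum_2 (puzzle : List String) : Prop :=
  ∀ row ∈ puzzle,
    (∀ x ∈ PySem.Str.split₀ row, PySem.Int.ofStr? x ≠ none) ∧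
    ((0 : Int) ∈ (PySem.Str.split₀ row).map (fun x => (PySem.Int.ofStr? x).getD 0) →
      ((PySem.Str.split₀ row).map (fun x => (PySem.Int.ofStr? x).getD 0)).length ≤ 1)
instance (puzzle : List String) : Decidable (Pre_checksum_2 puzzle) := by
  unfold Pre_checksum_2; infer_instance

def pvWitness_checksum_2 : List String := ["5 9 2 8", "9 4 7 3", "3 8 6 5"]

def Spec_checksum_2 (puzzle : List String) (out : Int) : Prop := out = checksum_2_alt puzzle
instance (puzzle : List String) (out : Int) : Decidable (Spec_checksum_2 puzzle out) := by
  unfold Spec_checksum_2; infer_instance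

-- ===== CLAIM (what is proved, stated in full; the proofs are below) =====
def Claim_equal_checksum_2 : Prop := ∀ (puzzle : List String), Dom_checksum_2 puzzle → Pre_checksum_2 puzzle → Spec_checksum_2 puzzle (checksum_2 puzzle)

-- ===== LEMMAS AND PROOFS =====

-- the summand of A's inner test: (i % j == 0) ? i // j : 0
def pvG (v w : Int) : Int :=
  if PySem.Int.mod v w = 0 then PySem.Int.floordiv v w else 0

-- A's per-row value in closed sum form
def pvARow (ns : List Int) : Int :=
  (ns.map (fun x => (ns.map (pvG x)).sum - pvG x x)).sum

-- B's per-row value as a recursion over the key list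
def pvBVal (cnt : Int → Int) : List Int → Int
  | [] => 0
  | v :: rest =>
    cnt v * (cnt v - 1)
      + (rest.map (fun w => cnt v * cnt w * pvG v w + cnt w * cnt v * pvG w v)).sum
      + pvBVal cnt rest

-- sum of F over the strict upper triangle of K × K, both orientations
def pvTri (F : Int → Int → Int) : List Int → Int
  | [] => 0
  | v :: rest => (rest.map (fun w => F v w + F w v)).sum + pvTri F rest

theorem pvG_self (v : Int) (h : v ≠ 0) : pvG v v = 1 := by
  have hm : PySem.Int.mod v v = 0 := (PySem.Int.mod_eq_zero_iff_dvd v v).mpr dvd_rfl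
  have hd := PySem.Int.floordiv_mul_add_mod v v
  rw [hm, add_zero] at hd
  unfold pvG
  rw [if_pos hm]
  have h1 : PySem.Int.floordiv v v * v = 1 * v := by rw [hd, one_mul]
  exact mul_right_cancel₀ h h1

theorem pv_sum_if_eq (K : List Int) (hnd : K.Nodup) (x : Int) (hx : x ∈ K) (h : Int → Int) :
    (K.map (fun v => if v = x then h v else 0)).sum = h x := by
  induction K with
  | nil => cases hx
  | cons a t ih =>
    rcases List.nodup_cons.mp hnd with ⟨ha, hndt⟩
    rcases List.mem_cons.mp hx with h1 | h1
    · subst h1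
      have ht : (t.map (fun v => if v = x then h v else 0)) = t.map (fun _ => (0 : Int)) := by
        apply List.map_congr_left; intro v hv
        rw [if_neg]; rintro rfl; exact ha hv
      simp [ht]
    · have hax : a ≠ x := by rintro rfl; exact ha h1
      simp only [List.map_cons, List.sum_cons, if_neg hax, ih hndt h1, zero_add]

-- count-weighting: a sum over the row equals the count-weighted sum over any nodup superset of its values
theorem pv_weight (ns : List Int) (K : List Int) (hnd : K.Nodup) (hsub : ∀ x ∈ ns, x ∈ K)
    (h : Int → Int) :
    (ns.map h).sum = (K.map (fun v => (ns.count v : Int) * h v)).sum := by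
  induction ns with
  | nil => simp
  | cons y ys ih =>
    have hsub' : ∀ x ∈ ys, x ∈ K := fun x hx => hsub x (List.mem_cons_of_mem _ hx)
    have hy : y ∈ K := hsub y List.mem_cons_self
    simp only [List.map_cons, List.sum_cons, ih hsub']
    have hmap : (K.map (fun v => (((y :: ys).count v : Nat) : Int) * h v))
         = K.map (fun v => ((ys.count v : Nat) : Int) * h v + (if v = y then h v else 0)) := by
      apply List.map_congr_left; intro v hv
      rw [List.count_cons]
      by_cases hvy : v = y
      · subst hvy
        simp only [BEq.rfl, if_true]
        push_cast; ring
      · have hb : (y == v) = false := beq_eq_false_iff_ne.mpr (fun e => hvy e.symm)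
        simp [hb, hvy]
    rw [hmap, PySem.List.sum_map_add_int, pv_sum_if_eq K hnd y hy h]
    ring

theorem pv_sq_eq_tri (F : Int → Int → Int) (K : List Int) :
    (K.map (fun v => (K.map (F v)).sum)).sum = pvTri F K + (K.map (fun v => F v v)).sum := by
  induction K with
  | nil => simp [pvTri]
  | cons a t ih =>
    simp only [pvTri, List.map_cons, List.sum_cons]
    have h4 := PySem.List.sum_map_add_int t (fun v => F v a) (fun v => (t.map (F v)).sum)
    have h3 := PySem.List.sum_map_add_int t (fun w => F a w) (fun w => F w a)
    linarith [h4, h3, ih]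

-- deleting the unique pair with first component i from a fst-strictly-increasing list
theorem pv_sum_del (l : List (Int × Int)) (i x : Int) (f : Int → Int)
    (hpw : l.Pairwise (fun p q => p.1 < q.1)) (hm : (i, x) ∈ l) :
    (l.map (fun q => if i = q.1 then 0 else f q.2)).sum
      = (l.map (fun q => f q.2)).sum - f x := by
  induction l with
  | nil => cases hm
  | cons q t ih =>
    rcases List.pairwise_cons.mp hpw with ⟨hq, hpt⟩
    rcases List.mem_cons.mp hm with h1 | h1
    · have hqi : q.1 = i := by rw [← h1]
      have hqx : q.2 = x := by rw [← h1]
      simp only [List.map_cons, List.sum_cons, if_pos hqi.symm]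
      have ht : (t.map (fun r => if i = r.1 then (0 : Int) else f r.2)) = t.map (fun r => f r.2) := by
        apply List.map_congr_left; intro r hr
        rw [if_neg]; intro he
        have hlt := hq r hr
        rw [hqi, ← he] at hlt
        exact lt_irrefl i hlt
      rw [ht, hqx]; ring
    · have hqi : i ≠ q.1 := by
        have hlt : q.1 < i := hq (i, x) h1
        omega
      simp only [List.map_cons, List.sum_cons, if_neg hqi, ih hpt h1]
      ring

theorem pvA_inner (ns : List Int) (p : Int × Int) (hp : p ∈ PySem.List.enumerate ns 0)
    (acc : Int) :
    (PySem.List.enumerate ns 0).foldl (fun acc2 q =>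
        if p.1 = q.1 then acc2
        else if PySem.Int.mod p.2 q.2 = 0 then acc2 + PySem.Int.floordiv p.2 q.2
        else acc2) acc
      = acc + ((ns.map (pvG p.2)).sum - pvG p.2 p.2) := by
  have hfun : (fun (acc2 : Int) (q : Int × Int) =>
      if p.1 = q.1 then acc2
      else if PySem.Int.mod p.2 q.2 = 0 then acc2 + PySem.Int.floordiv p.2 q.2 else acc2)
    = fun acc2 q => acc2 + (if p.1 = q.1 then 0 else pvG p.2 q.2) := by
    funext a q; unfold pvG; split_ifs <;> ring
  rw [hfun, PySem.List.foldl_add]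
  congr 1
  have hm : (p.1, p.2) ∈ PySem.List.enumerate ns 0 := by simpa using hp
  rw [pv_sum_del _ p.1 p.2 (pvG p.2) (PySem.List.pairwise_lt_enumerate ns 0) hm]
  congr 2
  have hme := congrArg (List.map (pvG p.2)) (PySem.List.map_snd_enumerate ns 0)
  rw [List.map_map] at hme
  exact hme

theorem pvA_row (ns : List Int) (acc : Int) :
    (PySem.List.enumerate ns 0).foldl (fun acc p =>
      (PySem.List.enumerate ns 0).foldl (fun acc2 q =>
        if p.1 = q.1 then acc2
        else if PySem.Int.mod p.2 q.2 = 0 then acc2 + PySem.Int.floordiv p.2 q.2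
        else acc2) acc) acc
      = acc + pvARow ns := by
  rw [PySem.List.foldl_congr_mem _ _
        (fun acc (p : Int × Int) => acc + ((ns.map (pvG p.2)).sum - pvG p.2 p.2)) acc
        (fun acc p hp => pvA_inner ns p hp acc),
      PySem.List.foldl_add]
  unfold pvARow
  congr 2
  have hme := congrArg (List.map (fun x => (ns.map (pvG x)).sum - pvG x x))
      (PySem.List.map_snd_enumerate ns 0)
  rw [List.map_map] at hme
  exact hme

theorem pvB_pairs (counts : PySem.Dict Int Int) (K : List Int) (acc : Int) :
    pvAltPairs counts K acc = acc + pvBVal (fun v => counts.getD v 0) K := by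
  induction K generalizing acc with
  | nil => simp [pvAltPairs, pvBVal]
  | cons v rest ih =>
    show pvAltPairs counts rest _ = _
    rw [ih]
    have hfun : (fun (a : Int) (w : Int) =>
        let d := counts.getD w 0
        let a1 := if PySem.Int.mod v w = 0 then a + counts.getD v 0 * d * PySem.Int.floordiv v w else a
        if PySem.Int.mod w v = 0 then a1 + d * counts.getD v 0 * PySem.Int.floordiv w v else a1)
      = fun a w => a + (counts.getD v 0 * counts.getD w 0 * pvG v w
                        + counts.getD w 0 * counts.getD v 0 * pvG w v) := by
      funext a w; unfold pvG; split_ifs <;> ring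
    rw [hfun, PySem.List.foldl_add]
    simp only [pvBVal]
    ring

theorem pvBVal_eq (cnt : Int → Int) (K : List Int) :
    pvBVal cnt K
      = pvTri (fun v w => cnt v * cnt w * pvG v w) K
        + (K.map (fun v => cnt v * (cnt v - 1))).sum := by
  induction K with
  | nil => simp [pvBVal, pvTri]
  | cons v rest ih =>
    simp only [pvBVal, pvTri, List.map_cons, List.sum_cons, ih]
    ring

-- the heart: A's per-row value equals B's, for rows that cannot divide by zero
theorem pv_row_eq (ns : List Int) (h0 : (0 : Int) ∈ ns → ns.length ≤ 1) :
    pvARow ns = pvBVal (fun v => (ns.count v : Int)) (PySem.List.dedup ns) := by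
  have hnd : (PySem.List.dedup ns).Nodup := PySem.List.nodup_dedup ns
  have hsub : ∀ x ∈ ns, x ∈ PySem.List.dedup ns :=
    fun x hx => (PySem.List.mem_dedup ns x).mpr hx
  set K := PySem.List.dedup ns with hK
  have h1 : pvARow ns
      = (K.map (fun v => (ns.count v : Int) *
          ((K.map (fun w => (ns.count w : Int) * pvG v w)).sum - pvG v v))).sum := by
    unfold pvARow
    rw [pv_weight ns K hnd hsub]
    congr 1
    apply List.map_congr_left
    intro v _
    rw [pv_weight ns K hnd hsub (pvG v)]
  have h2 : (K.map (fun v => (ns.count v : Int) *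
          ((K.map (fun w => (ns.count w : Int) * pvG v w)).sum - pvG v v)))
      = K.map (fun v => (K.map (fun w => (ns.count v : Int) * (ns.count w : Int) * pvG v w)).sum
          + (-((ns.count v : Int) * pvG v v))) := by
    apply List.map_congr_left
    intro v _
    rw [mul_sub, ← List.sum_map_mul_left]
    have hmm : (K.map (fun w => (ns.count v : Int) * ((ns.count w : Int) * pvG v w)))
        = K.map (fun w => (ns.count v : Int) * (ns.count w : Int) * pvG v w) := by
      apply List.map_congr_left; intro w _; ring
    rw [hmm]; ring
  rw [h1, h2, PySem.List.sum_map_add_int,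
      pv_sq_eq_tri (fun v w => (ns.count v : Int) * (ns.count w : Int) * pvG v w) K,
      pvBVal_eq]
  have h5 := PySem.List.sum_map_add_int K
      (fun v => (ns.count v : Int) * (ns.count v : Int) * pvG v v)
      (fun v => -((ns.count v : Int) * pvG v v))
  have h6 : (K.map (fun v => (ns.count v : Int) * (ns.count v : Int) * pvG v v
        + -((ns.count v : Int) * pvG v v)))
      = K.map (fun v => (ns.count v : Int) * ((ns.count v : Int) - 1)) := by
    apply List.map_congr_left
    intro v hv
    have hvns : v ∈ ns := (PySem.List.mem_dedup ns v).mp (hK ▸ hv)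
    by_cases hz : v = 0
    · subst hz
      have hc1 : ns.count (0 : Int) = 1 := by
        have hp : 0 < ns.count (0 : Int) := List.count_pos_iff.mpr hvns
        have hl : ns.count (0 : Int) ≤ ns.length := List.count_le_length
        have hlen := h0 hvns
        omega
      rw [hc1]; push_cast; ring
    · rw [pvG_self v hz]; ring
  have h7 := congrArg List.sum h6
  linarith [h5, h7]

theorem pv_per_row (row : String) (acc : Int)
    (hz : (0 : Int) ∈ (PySem.Str.split₀ row).map (fun x => (PySem.Int.ofStr? x).getD 0) →
      ((PySem.Str.split₀ row).map (fun x => (PySem.Int.ofStr? x).getD 0)).length ≤ 1) :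
    (PySem.List.enumerate ((PySem.Str.split₀ row).map (fun x => (PySem.Int.ofStr? x).getD 0))).foldl
      (fun acc p =>
        (PySem.List.enumerate ((PySem.Str.split₀ row).map (fun x => (PySem.Int.ofStr? x).getD 0))).foldl
          (fun acc2 q =>
            if p.1 = q.1 then acc2
            else if PySem.Int.mod p.2 q.2 = 0 then acc2 + PySem.Int.floordiv p.2 q.2
            else acc2) acc) acc
    = pvAltPairs
        (((PySem.Str.split₀ row).map (fun x => (PySem.Int.ofStr? x).getD 0)).foldl
          (fun d v => d.insert v (d.getD v 0 + 1)) (PySem.Dict.empty : PySem.Dict Int Int))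
        (((PySem.Str.split₀ row).map (fun x => (PySem.Int.ofStr? x).getD 0)).foldl
          (fun d v => d.insert v (d.getD v 0 + 1)) (PySem.Dict.empty : PySem.Dict Int Int)).keys acc := by
  set ns := (PySem.Str.split₀ row).map (fun x => (PySem.Int.ofStr? x).getD 0) with hns
  rw [pvA_row, pvB_pairs, PySem.Dict.foldl_insert_getD_add_one_eq_counter,
      PySem.Dict.keys_counter, ← PySem.List.dedup_eq_ofList]
  have hcnt : (fun v => (PySem.Dict.counter ns).getD v 0)
      = fun v => ((ns.count v : Nat) : Int) :=
    funext (fun v => PySem.Dict.getD_counter ns v)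
  rw [hcnt, ← pv_row_eq ns hz]

theorem pv_fold (l : List String)
    (hl : ∀ row ∈ l,
      (0 : Int) ∈ (PySem.Str.split₀ row).map (fun x => (PySem.Int.ofStr? x).getD 0) →
      ((PySem.Str.split₀ row).map (fun x => (PySem.Int.ofStr? x).getD 0)).length ≤ 1)
    (acc : Int) :
    l.foldl (fun result_sum row =>
      (PySem.List.enumerate ((PySem.Str.split₀ row).map (fun x => (PySem.Int.ofStr? x).getD 0))).foldl
        (fun acc p =>
          (PySem.List.enumerate ((PySem.Str.split₀ row).map (fun x => (PySem.Int.ofStr? x).getD 0))).foldl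
            (fun acc2 q =>
              if p.1 = q.1 then acc2
              else if PySem.Int.mod p.2 q.2 = 0 then acc2 + PySem.Int.floordiv p.2 q.2
              else acc2) acc) result_sum) acc
    = l.foldl (fun total row =>
        pvAltPairs
          (((PySem.Str.split₀ row).map (fun x => (PySem.Int.ofStr? x).getD 0)).foldl
            (fun d v => d.insert v (d.getD v 0 + 1)) (PySem.Dict.empty : PySem.Dict Int Int))
          (((PySem.Str.split₀ row).map (fun x => (PySem.Int.ofStr? x).getD 0)).foldl
            (fun d v => d.insert v (d.getD v 0 + 1)) (PySem.Dict.empty : PySem.Dict Int Int)).keys total) acc := by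
  induction l generalizing acc with
  | nil => rfl
  | cons r t ih =>
    simp only [List.foldl_cons]
    rw [pv_per_row r acc (hl r List.mem_cons_self)]
    exact ih (fun row h => hl row (List.mem_cons_of_mem _ h)) _

-- ===== VERDICT (by name: the statement is the Claim_ definition above) =====
theorem checksum_2_spec : Claim_equal_checksum_2 := by
  intro puzzle _hdom hpre
  unfold Spec_checksum_2
  simp only [checksum_2, checksum_2_alt]
  exact pv_fold puzzle (fun row h => (hpre row h).2) 0
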